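-- pv_equiv track=rewrite | github.com/Maix741/Password_Manager | src/utils/password_checks.py | check_password_duplication
-- ===== SOURCE A (Python) =====
-- from collections import defaultdict
--
-- def check_password_duplication(all_passwords: list[dict]) -> list[list[dict]]:
--     """Checks for duplicate passwords in the provided list.
--     Returns a list of lists, where each inner list contains entries with the same reused password.
--     """
--
--     password_map = defaultdict(list)
--     for entry in all_passwords:
--         password = entry.get("password")
--         if password:
--             password_map[password].append(entry)
--
--     # Only include lists with more than one entry
--     duplicates = [entries for entries in password_map.values() if len(entries) > 1]
--     return duplicates
-- ===== SOURCE B (Python) =====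
-- def check_password_duplication(all_passwords: list[dict]) -> list[list[dict]]:
--     """Checks for duplicate passwords in the provided list.
--     Returns a list of lists, where each inner list contains entries with the same reused password.
--     """
--     pairs = [(entry.get("password"), entry) for entry in all_passwords if entry.get("password")]
--     duplicates = []
--     for password in dict.fromkeys(p for p, _ in pairs):
--         group = [entry for p, entry in pairs if p == password]
--         if len(group) > 1:
--             duplicates.append(group)
--     return duplicates
-- ===== Notes on version B (the rewrite author's own statement) =====
-- stated objective: alternative
-- what changed: Replaces the single-pass defaultdict grouping with a dict-free two-phase algorithm: collect the truthy (password, entry) pairs, deduplicate the passwords in first-appearance order, then rebuild each group by a scan per distinct password and keep those with more than one entry.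
import Mathlib
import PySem

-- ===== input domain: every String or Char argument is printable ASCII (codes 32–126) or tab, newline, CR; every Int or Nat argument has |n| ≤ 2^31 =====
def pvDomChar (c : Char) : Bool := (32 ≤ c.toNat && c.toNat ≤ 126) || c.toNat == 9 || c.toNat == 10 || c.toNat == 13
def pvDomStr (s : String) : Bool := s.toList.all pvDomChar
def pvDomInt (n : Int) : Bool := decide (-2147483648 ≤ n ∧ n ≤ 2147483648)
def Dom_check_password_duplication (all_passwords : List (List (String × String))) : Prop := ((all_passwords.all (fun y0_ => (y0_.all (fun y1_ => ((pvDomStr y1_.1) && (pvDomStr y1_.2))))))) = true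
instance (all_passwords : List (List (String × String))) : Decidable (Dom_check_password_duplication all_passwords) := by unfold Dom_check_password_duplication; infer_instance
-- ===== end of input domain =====

-- B replaces A's single-pass defaultdict grouping by a dict-free two-phase algorithm
-- (dedup the truthy passwords, then rebuild each group by a scan); alternative, same results.


-- ===== PORT A =====
-- entry.get("password"): first match in the association list (Python dict lookup)
def pvGetPassword (entry : List (String × String)) : Option String :=
  (entry.find? (fun kv => kv.1 == "password")).map (·.2)

def check_password_duplication (all_passwords : List (List (String × String))) : List (List (List (String × String))) :=
  let password_map : PySem.Dict String (List (List (String × String))) :=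
    all_passwords.foldl (fun d entry =>
      match pvGetPassword entry with
      | some password => if password ≠ "" then d.modify password [] (· ++ [entry]) else d
      | none => d) PySem.Dict.empty
  password_map.values.filter (fun entries => decide (1 < entries.length))

-- ===== PORT B =====
def check_password_duplication_alt (all_passwords : List (List (String × String))) : List (List (List (String × String))) :=
  let pairs : List (String × List (String × String)) :=
    all_passwords.filterMap (fun entry =>
      match pvGetPassword entry with
      | some password => if password ≠ "" then some (password, entry) else none
      | none => none)
  (PySem.List.dedup (pairs.map (·.1))).foldl (fun duplicates password =>
    let group := (pairs.filter (fun pe => pe.1 == password)).map (·.2)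
    if 1 < group.length then duplicates ++ [group] else duplicates) []

-- ===== PRECONDITION & SPEC =====
def Spec_check_password_duplication (all_passwords : List (List (String × String))) (out : List (List (List (String × String)))) : Prop := out = check_password_duplication_alt all_passwords
instance (all_passwords : List (List (String × String))) (out : List (List (List (String × String)))) : Decidable (Spec_check_password_duplication all_passwords out) := by unfold Spec_check_password_duplication; infer_instance

-- ===== CLAIM (what is proved, stated in full; the proofs are below) =====
def Claim_equal_check_password_duplication : Prop := ∀ (all_passwords : List (List (String × String))), Dom_check_password_duplication all_passwords → Spec_check_password_duplication all_passwords (check_password_duplication all_passwords)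

-- ===== LEMMAS AND PROOFS =====

-- A's loop over entries is the same fold over the truthy (password, entry) pairs B extracts.
theorem pvFoldl_pairs (xs : List (List (String × String)))
    (d : PySem.Dict String (List (List (String × String)))) :
    xs.foldl (fun d entry =>
      match pvGetPassword entry with
      | some password => if password ≠ "" then d.modify password [] (· ++ [entry]) else d
      | none => d) d
    = (xs.filterMap (fun entry =>
        match pvGetPassword entry with
        | some password => if password ≠ "" then some (password, entry) else none
        | none => none)).foldl (fun d pe => d.modify pe.1 [] (· ++ [pe.2])) d := by
  induction xs generalizing d with
  | nil => rfl
  | cons e xs ih =>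
    simp only [List.foldl_cons, List.filterMap_cons]
    cases h : pvGetPassword e with
    | none => exact ih d
    | some p =>
      by_cases hp : p = ""
      · simp only [hp, ne_eq, not_true_eq_false, if_false]
        exact ih d
      · simp only [if_pos (show p ≠ "" from hp), List.foldl_cons]
        exact ih _

-- ===== VERDICT (by name: the statement is the Claim_ definition above) =====
theorem check_password_duplication_spec : Claim_equal_check_password_duplication := by
  intro xs _
  unfold Spec_check_password_duplication check_password_duplication check_password_duplication_alt
  simp only []
  rw [pvFoldl_pairs]
  set pairs := xs.filterMap (fun entry =>
        match pvGetPassword entry with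
        | some password => if password ≠ "" then some (password, entry) else none
        | none => none) with hpairs
  have hnd : (pairs.foldl (fun d pe => d.modify pe.1 [] (· ++ [pe.2])) PySem.Dict.empty).keys.Nodup := by
    apply PySem.Dict.nodup_keys_foldl_modify_key
    simp
  rw [PySem.Dict.values_eq_map_keys _ hnd []]
  rw [PySem.Dict.keys_foldl_modify_key]
  have hgrp : ∀ p, (pairs.foldl (fun d pe => d.modify pe.1 [] (· ++ [pe.2])) PySem.Dict.empty).getD p []
      = (pairs.filter (fun pe => pe.1 == p)).map (·.2) := by
    intro p
    simpa using PySem.Dict.getD_foldl_modify_append pairs PySem.Dict.empty p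
  simp only [PySem.Dict.keys_empty]
  rw [PySem.List.foldl_append_ite]
  simp only [hgrp, List.filter_map]
  congr 1
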